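-- pv_equiv track=rewrite | github.com/ElchaabiMohamed/InferCode_SVM | NC-5690-python-files/program_1695.py | doubleChiffre
-- ===== SOURCE A (Python) =====
-- def doubleChiffre(nombre):
--   nombre = str(nombre)
--   res = False
--   i = 0
--   while res == False and i < len(nombre)-1:
--     if nombre[i] == nombre[i+1]:
--       res = True
--     i+=1
--
--   return res
-- ===== SOURCE B (Python) =====
-- from itertools import groupby
--
-- def doubleChiffre(nombre):
--     return any(sum(1 for _ in g) > 1 for _, g in groupby(str(nombre)))
-- ===== Notes on version B (the rewrite author's own statement) =====
-- stated objective: idiomatic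
-- what changed: Replaces the index-based while loop with early-exit flag by a run-length grouping of str(nombre) via itertools.groupby, returning whether any run is longer than one.
import Mathlib
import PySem

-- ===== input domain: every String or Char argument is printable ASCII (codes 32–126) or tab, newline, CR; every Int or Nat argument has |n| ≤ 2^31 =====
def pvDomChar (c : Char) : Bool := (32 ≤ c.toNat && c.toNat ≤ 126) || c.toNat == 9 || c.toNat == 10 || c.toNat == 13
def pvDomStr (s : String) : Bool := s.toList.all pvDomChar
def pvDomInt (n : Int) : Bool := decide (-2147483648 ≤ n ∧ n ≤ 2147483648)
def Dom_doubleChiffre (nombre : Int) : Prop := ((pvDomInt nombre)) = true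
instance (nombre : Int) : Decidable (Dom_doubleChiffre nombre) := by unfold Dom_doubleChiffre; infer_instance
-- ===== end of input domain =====

-- B replaces A's index-based while loop (early-exit flag) by run-length grouping of str(nombre)
-- and a check for a run longer than one (objective: idiomatic).

-- ===== PORT A =====
-- while res == False and i < len(s)-1: if s[i] == s[i+1]: res = True; i += 1
def doubleChiffreLoop (s : List Char) (res : Bool) (i : Nat) : Bool :=
  if h : res = false ∧ i < s.length - 1 then
    doubleChiffreLoop s (if s.getD i ' ' = s.getD (i+1) ' ' then true else res) (i+1)
  else res
termination_by s.length - 1 - i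
decreasing_by omega

def doubleChiffre (nombre : Int) : Bool :=
  doubleChiffreLoop (PySem.Int.toStr nombre).toList false 0

-- ===== PORT B =====
-- itertools.groupby: maximal runs of equal adjacent chars, as (char, run-length) pairs
def bRuns : List Char → List (Char × Nat)
  | [] => []
  | c :: cs =>
    match bRuns cs with
    | (d, k) :: t => if c = d then (d, k+1) :: t else (c, 1) :: (d, k) :: t
    | [] => [(c, 1)]

def doubleChiffre_alt (nombre : Int) : Bool :=
  (bRuns (PySem.Int.toStr nombre).toList).any (fun g => 1 < g.2)

-- ===== PRECONDITION & SPEC =====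
def Spec_doubleChiffre (nombre : Int) (out : Bool) : Prop := out = doubleChiffre_alt nombre
instance (nombre : Int) (out : Bool) : Decidable (Spec_doubleChiffre nombre out) := by unfold Spec_doubleChiffre; infer_instance

-- ===== CLAIM (what is proved, stated in full; the proofs are below) =====
def Claim_equal_doubleChiffre : Prop := ∀ (nombre : Int), Dom_doubleChiffre nombre → Spec_doubleChiffre nombre (doubleChiffre nombre)

-- ===== LEMMAS AND PROOFS =====

-- reference predicate: the list has two equal adjacent elements
def hasAdj : List Char → Bool
  | a :: b :: t => a = b || hasAdj (b :: t)
  | _ => false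

theorem doubleChiffreLoop_true (s : List Char) (i : Nat) :
    doubleChiffreLoop s true i = true := by
  unfold doubleChiffreLoop; simp

theorem doubleChiffreLoop_eq_hasAdj (s : List Char) (i : Nat) :
    doubleChiffreLoop s false i = hasAdj (s.drop i) := by
  unfold doubleChiffreLoop
  by_cases h : i < s.length - 1
  · rw [dif_pos (show (false = false ∧ i < s.length - 1) from ⟨rfl, h⟩)]
    have hi : i < s.length := by omega
    have hi1 : i + 1 < s.length := by omega
    have hd : s.drop i = s[i] :: s.drop (i+1) := List.drop_eq_getElem_cons hi
    have hd1 : s.drop (i+1) = s[i+1] :: s.drop (i+2) := List.drop_eq_getElem_cons hi1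
    have g0 : s.getD i ' ' = s[i] := List.getD_eq_getElem s ' ' hi
    have g1 : s.getD (i+1) ' ' = s[i+1] := List.getD_eq_getElem s ' ' hi1
    rw [hd, hd1, g0, g1]
    by_cases he : s[i] = s[i+1]
    · simp [he, doubleChiffreLoop_true, hasAdj]
    · simp only [he, if_false]
      rw [doubleChiffreLoop_eq_hasAdj s (i+1), hd1]
      simp [hasAdj, he]
  · have : s.length - 1 ≤ i := by omega
    have hdrop : hasAdj (s.drop i) = false := by
      rcases Nat.lt_or_ge i s.length with hlt | hge
      · have : s.length = i + 1 := by omega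
        have : (s.drop i).length = 1 := by simp [this]
        match hm : s.drop i, this with
        | [a], _ => simp [hasAdj]
      · simp [List.drop_eq_nil_of_le hge, hasAdj]
    simp [h, hdrop]
termination_by s.length - 1 - i
decreasing_by omega

theorem bRuns_cons_cons (c d : Char) (t : List Char) :
    bRuns (c :: d :: t) = (match bRuns (d :: t) with
      | (e, k) :: r => if c = e then (e, k+1) :: r else (c, 1) :: (e, k) :: r
      | [] => [(c, 1)]) := rfl

theorem bRuns_cons (c : Char) (cs : List Char) :
    ∃ k t, bRuns (c :: cs) = (c, k) :: t ∧ 1 ≤ k := by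
  induction cs generalizing c with
  | nil => exact ⟨1, [], rfl, le_refl 1⟩
  | cons d t ih =>
    obtain ⟨k, r, hr, hk⟩ := ih d
    by_cases h : c = d
    · refine ⟨k + 1, r, ?_, by omega⟩
      rw [bRuns_cons_cons, hr]; simp [h]
    · refine ⟨1, (d, k) :: r, ?_, le_refl 1⟩
      rw [bRuns_cons_cons, hr]; simp [h]

theorem bRuns_any_eq_hasAdj (l : List Char) :
    (bRuns l).any (fun g => 1 < g.2) = hasAdj l := by
  induction l with
  | nil => simp [bRuns, hasAdj]
  | cons a l ih =>
    cases l with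
    | nil => simp [bRuns, hasAdj]
    | cons b t =>
      obtain ⟨k, r, hr, hk⟩ := bRuns_cons b t
      rw [bRuns_cons_cons, hr]
      rw [hr] at ih
      by_cases h : a = b
      · have h1 : (1 : Nat) < k + 1 := by omega
        simp [h, hasAdj, h1]
      · simp only [List.any_cons] at ih
        simp [h, hasAdj, ih]

-- ===== VERDICT (by name: the statement is the Claim_ definition above) =====
theorem doubleChiffre_spec : Claim_equal_doubleChiffre := by
  intro n _
  show doubleChiffre n = doubleChiffre_alt n
  unfold doubleChiffre doubleChiffre_alt
  rw [doubleChiffreLoop_eq_hasAdj, List.drop_zero, bRuns_any_eq_hasAdj]
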